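-- pv_equiv track=rewrite | github.com/Gachon-Vigilante/Retriever_Flask | utils.py | merge_parallel_unique_by_link
-- ===== SOURCE A (Python) =====
-- from collections import deque
--
-- def merge_parallel_unique_by_link(all_urls: dict[str, list[dict[str, str]]]) -> list[dict[str, str]]:
--     """
--         여러 개의 리스트(dict[str, str] 형식)를 병렬적으로 interleaving 순회하면서,
--         각 dict의 "link" 값을 기준으로 중복을 제거한 결과 리스트를 반환합니다.
--
--         각 리스트의 앞쪽부터 번갈아 가며 요소를 하나씩 추출하고,
--         "link" 값이 중복되지 않는 경우에만 결과에 추가합니다.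
--
--         :param all_urls: 여러 개의 dict[str, str] 리스트를 값으로 가지는 딕셔너리
--                          예: {"a": [{"link": "url1", ...}, ...], "b": [...], ...}
--         :type all_urls: dict[str, list[dict[str, str]]]
--         :return: 중복되지 않은 "link"를 기준으로 병렬적으로 수집된 결과 리스트
--         :rtype: list[dict[str, str]]
--     """
--     queues = [deque(lst) for lst in all_urls.values()] # deque된 Queue 객체를 여러 개 생성
--     seen_links = set()
--     result = []
--
--     while any(queues): # 값이 있는 Queue가 하나라도 있다면 계속해서 순회
--         for queue in queues: # 모든 Queue에 대해서 각 Queue에서 데이터를 하나씩 순회하면서 뽑아서 저장(interleaving)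
--             if queue: # Queue가 [], 즉 소진되지 않았을 경우에만 데이터 pop
--                 item:dict[str, str] = queue.popleft()
--                 link = item.get("link")
--                 if link and link not in seen_links:
--                     seen_links.add(link)
--                     result.append(item)
--     return result
-- ===== SOURCE B (Python) =====
-- def merge_parallel_unique_by_link(all_urls: dict[str, list[dict[str, str]]]) -> list[dict[str, str]]:
--     """Column-major re-implementation: iterate round indices 0..max_len-1 and,
--     within each round, scan the lists left-to-right, taking the i-th element of
--     each list that still has one; dedup by truthy 'link' with a seen set."""
--     lists = list(all_urls.values())
--     seen_links = set()
--     result = []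
--     width = max(map(len, lists), default=0)
--     for i in range(width):
--         for lst in lists:
--             if i < len(lst):
--                 item = lst[i]
--                 link = item.get("link")
--                 if link and link not in seen_links:
--                     seen_links.add(link)
--                     result.append(item)
--     return result
-- ===== Notes on version B (the rewrite author's own statement) =====
-- stated objective: idiomatic
-- what changed: Replaces the deque queues and the while-any round loop with direct column-major index iteration (for each round index i, take the i-th element of every list that still has one), keeping the same truthy-link dedup; no mutable queue state is maintained.
import Mathlib
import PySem

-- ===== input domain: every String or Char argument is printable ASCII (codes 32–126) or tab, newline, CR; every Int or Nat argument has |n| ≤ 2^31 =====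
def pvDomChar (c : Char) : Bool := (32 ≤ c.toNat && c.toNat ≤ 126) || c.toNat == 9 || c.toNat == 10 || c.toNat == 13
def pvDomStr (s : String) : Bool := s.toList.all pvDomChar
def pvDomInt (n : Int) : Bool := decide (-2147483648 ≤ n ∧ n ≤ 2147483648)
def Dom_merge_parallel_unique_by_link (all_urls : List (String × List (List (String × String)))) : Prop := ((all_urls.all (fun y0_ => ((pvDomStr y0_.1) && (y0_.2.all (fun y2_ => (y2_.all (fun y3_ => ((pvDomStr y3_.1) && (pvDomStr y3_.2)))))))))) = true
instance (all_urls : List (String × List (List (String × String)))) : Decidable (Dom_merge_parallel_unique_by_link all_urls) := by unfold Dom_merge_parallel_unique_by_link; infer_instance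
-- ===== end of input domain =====

-- B replaces A's deque queues and while-any loop by column-major index iteration (idiomatic; same cost).


-- ===== PORT A =====
-- state carried by A's loop: (seen_links, result)
abbrev pvSt := PySem.Set String × List (List (String × String))

-- body of "link = item.get('link'); if link and link not in seen_links: …"
def pvAStep (st : pvSt) (item : List (String × String)) : pvSt :=
  match List.lookup "link" item with
  | some link => if link ≠ "" ∧ link ∉ st.1 then (PySem.Set.add st.1 link, st.2 ++ [item]) else st
  | none => st

-- one pass of A's inner "for queue in queues": pops the head of each nonempty queue
def pvARound (queues : List (List (List (String × String)))) (st : pvSt) :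
    List (List (List (String × String))) × pvSt :=
  queues.foldl
    (fun acc q =>
      match q with
      | [] => (acc.1 ++ [[]], acc.2)
      | item :: rest => (acc.1 ++ [rest], pvAStep acc.2 item))
    ([], st)

-- helper facts the port needs for termination of the while-loop
theorem pvARound_eq (queues : List (List (List (String × String)))) (st : pvSt)
    (acc : List (List (List (String × String)))) :
    queues.foldl
      (fun acc q =>
        match q with
        | [] => (acc.1 ++ [[]], acc.2)
        | item :: rest => (acc.1 ++ [rest], pvAStep acc.2 item))
      (acc, st)
    = (acc ++ queues.map List.tail,
       queues.foldl (fun st q => match q with | [] => st | item :: _ => pvAStep st item) st) := by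
  induction queues generalizing acc st with
  | nil => simp
  | cons q qs ih =>
    cases q with
    | nil =>
      rw [List.foldl_cons]
      have h := ih st (acc ++ [[]])
      rw [List.append_assoc] at h
      exact h
    | cons a l =>
      rw [List.foldl_cons]
      have h := ih (pvAStep st a) (acc ++ [l])
      rw [List.append_assoc] at h
      exact h

theorem pvSum_tail_lt (queues : List (List (List (String × String))))
    (h : queues.any (fun q => !q.isEmpty) = true) :
    ((queues.map List.tail).map List.length).sum < (queues.map List.length).sum := by
  induction queues with
  | nil => simp at h
  | cons q qs ih =>
    cases q with
    | nil =>
      simp only [List.any_cons, List.isEmpty_nil, Bool.not_true, Bool.false_or] at h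
      simpa using ih h
    | cons a l =>
      by_cases h' : qs.any (fun q => !q.isEmpty) = true
      · have := ih h'
        simp only [List.map_cons, List.tail_cons, List.sum_cons, List.length_cons]
        omega
      · have hall : ((qs.map List.tail).map List.length).sum ≤ (qs.map List.length).sum := by
          clear h ih h'
          induction qs with
          | nil => simp
          | cons r rs ih2 =>
            simp only [List.map_cons, List.sum_cons]
            have : r.tail.length ≤ r.length := by cases r <;> simp
            omega
        simp only [List.map_cons, List.tail_cons, List.sum_cons, List.length_cons]
        omega

-- "while any(queues): for queue in queues: …"
def pvALoop (queues : List (List (List (String × String)))) (st : pvSt) :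
    List (List (String × String)) :=
  if h : queues.any (fun q => !q.isEmpty) = true then
    pvALoop (pvARound queues st).1 (pvARound queues st).2
  else st.2
termination_by (queues.map List.length).sum
decreasing_by
  have he : (pvARound queues st).1 = queues.map List.tail := by
    unfold pvARound; rw [pvARound_eq]; simp
  rw [he]; exact pvSum_tail_lt queues h

def merge_parallel_unique_by_link (all_urls : List (String × List (List (String × String)))) :
    List (List (String × String)) :=
  pvALoop (all_urls.map (fun kv => kv.2)) (PySem.Set.empty, [])

-- ===== PORT B =====
-- same dedup body as the Python B's inner branch
def pvBStep (st : pvSt) (item : List (String × String)) : pvSt :=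
  match List.lookup "link" item with
  | some link => if link ≠ "" ∧ link ∉ st.1 then (PySem.Set.add st.1 link, st.2 ++ [item]) else st
  | none => st

def merge_parallel_unique_by_link_alt (all_urls : List (String × List (List (String × String)))) :
    List (List (String × String)) :=
  let lists := all_urls.map (fun kv => kv.2)
  let width := (lists.map List.length).foldl Nat.max 0
  ((List.range width).foldl
    (fun st i =>
      lists.foldl (fun st lst => if h : i < lst.length then pvBStep st lst[i] else st) st)
    ((PySem.Set.empty : PySem.Set String), ([] : List (List (String × String))))).2

-- ===== PRECONDITION & SPEC =====
def Spec_merge_parallel_unique_by_link (all_urls : List (String × List (List (String × String)))) (out : List (List (String × String))) : Prop := out = merge_parallel_unique_by_link_alt all_urls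
instance (all_urls : List (String × List (List (String × String)))) (out : List (List (String × String))) : Decidable (Spec_merge_parallel_unique_by_link all_urls out) := by unfold Spec_merge_parallel_unique_by_link; infer_instance

-- ===== CLAIM (what is proved, stated in full; the proofs are below) =====
def Claim_equal_merge_parallel_unique_by_link : Prop := ∀ (all_urls : List (String × List (List (String × String)))), Dom_merge_parallel_unique_by_link all_urls → Spec_merge_parallel_unique_by_link all_urls (merge_parallel_unique_by_link all_urls)

-- ===== LEMMAS AND PROOFS =====

-- B's inner column pass, as a named function (proof helper)
def pvCol (lists : List (List (List (String × String)))) (st : pvSt) (i : Nat) : pvSt :=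
  lists.foldl (fun st lst => if h : i < lst.length then pvBStep st lst[i] else st) st

theorem pvCol_zero (lists : List (List (List (String × String)))) (st : pvSt) :
    lists.foldl (fun st q => match q with | [] => st | item :: _ => pvAStep st item) st
      = pvCol lists st 0 := by
  unfold pvCol
  congr 1
  funext st q
  cases q <;> simp [pvAStep, pvBStep]

theorem pvCol_shift (lists : List (List (List (String × String)))) (st : pvSt) (i : Nat) :
    pvCol lists st (i + 1) = pvCol (lists.map List.tail) st i := by
  unfold pvCol
  rw [List.foldl_map]
  congr 1
  funext st q
  cases q with
  | nil => simp
  | cons a l => simp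

theorem pvFoldlMax_acc (l : List Nat) (b : Nat) :
    l.foldl Nat.max b = Nat.max b (l.foldl Nat.max 0) := by
  induction l generalizing b with
  | nil => simp
  | cons x xs ih =>
    simp only [List.foldl_cons]
    rw [ih (Nat.max b x), ih (Nat.max 0 x)]
    simp [Nat.max_assoc]

theorem pvMax_zero_iff (l : List Nat) : l.foldl Nat.max 0 = 0 ↔ ∀ n ∈ l, n = 0 := by
  induction l with
  | nil => simp
  | cons x xs ih =>
    rw [List.foldl_cons, pvFoldlMax_acc, List.forall_mem_cons, ← ih]
    simp only [Nat.max_def]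
    split_ifs <;> omega

theorem pvMax_pred (l : List Nat) :
    (l.map (fun n => n - 1)).foldl Nat.max 0 = l.foldl Nat.max 0 - 1 := by
  induction l with
  | nil => simp
  | cons x xs ih =>
    simp only [List.map_cons, List.foldl_cons]
    rw [pvFoldlMax_acc, pvFoldlMax_acc (b := Nat.max 0 x), ih]
    simp only [Nat.max_def]
    split_ifs <;> omega

theorem pvAny_false_iff (qs : List (List (List (String × String)))) :
    qs.any (fun q => !q.isEmpty) = false ↔ ∀ q ∈ qs, q = [] := by
  simp [List.any_eq_false]

-- main bridge: A's while-loop equals B's column fold, for any width bound matching the max length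
theorem pvMain (w : Nat) :
    ∀ (qs : List (List (List (String × String)))) (st : pvSt),
      (qs.map List.length).foldl Nat.max 0 = w →
      pvALoop qs st = ((List.range w).foldl (fun st i => pvCol qs st i) st).2 := by
  induction w with
  | zero =>
    intro qs st hM
    have hall : ∀ q ∈ qs, q = [] := by
      intro q hq
      have : q.length = 0 := (pvMax_zero_iff _).mp hM q.length (List.mem_map_of_mem hq)
      exact List.length_eq_zero_iff.mp this
    rw [pvALoop]
    rw [dif_neg]
    · simp
    · simp
      intro q hq
      simp [hall q hq]
  | succ w ih =>
    intro qs st hM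
    have hany : qs.any (fun q => !q.isEmpty) = true := by
      by_contra hc
      have : qs.any (fun q => !q.isEmpty) = false := by
        cases h : qs.any (fun q => !q.isEmpty) <;> simp_all
      have hall := (pvAny_false_iff qs).mp this
      have : ∀ n ∈ qs.map List.length, n = 0 := by
        intro n hn
        obtain ⟨q, hq, rfl⟩ := List.mem_map.mp hn
        simp [hall q hq]
      rw [(pvMax_zero_iff _).mpr this] at hM
      omega
    rw [pvALoop, dif_pos hany]
    have hround : pvARound qs st
        = (qs.map List.tail,
           qs.foldl (fun st q => match q with | [] => st | item :: _ => pvAStep st item) st) := by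
      unfold pvARound; rw [pvARound_eq]; simp
    rw [hround]
    have hM' : ((qs.map List.tail).map List.length).foldl Nat.max 0 = w := by
      have hcomp : (qs.map List.tail).map List.length = (qs.map List.length).map (fun n => n - 1) := by
        simp [List.map_map, Function.comp_def, List.length_tail]
      rw [hcomp, pvMax_pred, hM]
      omega
    rw [ih (qs.map List.tail) _ hM']
    rw [List.range_succ_eq_map, List.foldl_cons, List.foldl_map, pvCol_zero]
    exact congrArg Prod.snd (by
      congr 1
      funext st i
      exact (pvCol_shift qs st i).symm)

-- ===== VERDICT (by name: the statement is the Claim_ definition above) =====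
theorem merge_parallel_unique_by_link_spec : Claim_equal_merge_parallel_unique_by_link := by
  intro all_urls _
  unfold Spec_merge_parallel_unique_by_link
  unfold merge_parallel_unique_by_link merge_parallel_unique_by_link_alt
  rw [pvMain ((((all_urls.map (fun kv => kv.2)).map List.length).foldl Nat.max 0))
        (all_urls.map (fun kv => kv.2)) (PySem.Set.empty, []) rfl]
  rfl
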